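-- pv_equiv track=rewrite | github.com/ibkvictor/algorithms | divide_counquer/inversion_count.py | split_count
-- ===== SOURCE A (Python) =====
-- def split_count(left, right):
-- 	value = 0
-- 	i = 0
-- 	j = 0
-- 	while i < len(left) and j < len(right):
-- 		if left[i] <= right[j]:
-- 			j+= 1
-- 		else:
-- 			j+=1
-- 			value += 1
-- 		if j == len(right) and i <  len(left) - 1:
-- 			j = 0
-- 			i += 1
-- 		if j == len(right) and i == len(left) - 1:
-- 			return value
-- 	return value
-- ===== SOURCE B (Python) =====
-- def split_count(left, right):
--     sr = sorted(right)
--     def bl(x):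
--         lo, hi = 0, len(sr)
--         while lo < hi:
--             mid = (lo + hi) // 2
--             if sr[mid] < x:
--                 lo = mid + 1
--             else:
--                 hi = mid
--         return lo
--     total = 0
--     for x in left:
--         total += bl(x)
--     return total
-- ===== Notes on version B (the rewrite author's own statement) =====
-- stated objective: faster
-- what changed: Replaces A's nested rescans of right for every left element by sorting right once and counting elements below each left[i] with a hand-written binary search.
import Mathlib
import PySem

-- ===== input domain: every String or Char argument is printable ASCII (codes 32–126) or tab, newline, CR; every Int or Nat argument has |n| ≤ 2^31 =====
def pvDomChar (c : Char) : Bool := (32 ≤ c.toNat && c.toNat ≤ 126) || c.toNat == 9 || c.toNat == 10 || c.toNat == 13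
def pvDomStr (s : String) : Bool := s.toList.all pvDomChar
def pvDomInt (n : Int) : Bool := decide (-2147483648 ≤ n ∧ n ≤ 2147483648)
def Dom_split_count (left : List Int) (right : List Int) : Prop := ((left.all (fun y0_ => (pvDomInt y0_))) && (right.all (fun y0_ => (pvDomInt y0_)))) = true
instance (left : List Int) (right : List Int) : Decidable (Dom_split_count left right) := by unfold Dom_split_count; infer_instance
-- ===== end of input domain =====

-- B sorts right once and binary-searches it per left element instead of A's pointer sweep over right for every left[i]; objective: faster.

-- ===== PORT A =====
-- A's while loop: state (value, i, j); j sweeps right, resets when exhausted and i advances.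
def splitLoop (left right : List Int) (value : Int) (i j : Nat) : Int :=
  if _h : i < left.length ∧ j < right.length then
    let v := if left[i]! ≤ right[j]! then value else value + 1
    let j' := j + 1
    if j' = right.length ∧ i < left.length - 1 then
      splitLoop left right v (i + 1) 0
    else if j' = right.length ∧ i = left.length - 1 then v
    else splitLoop left right v i j'
  else value
termination_by (left.length - i, right.length - j)
decreasing_by
  all_goals first
    | (apply Prod.Lex.left; omega)
    | (apply Prod.Lex.right; omega)

def split_count (left : List Int) (right : List Int) : Int :=
  splitLoop left right 0 0 0

-- ===== PORT B =====
-- hand-written bisect_left from Source B: while lo < hi: mid = (lo+hi)//2; …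
def blLoop (sr : List Int) (x : Int) (lo hi : Nat) : Nat :=
  if lo < hi then
    let mid := (lo + hi) / 2
    if sr[mid]! < x then blLoop sr x (mid + 1) hi else blLoop sr x lo mid
  else lo
termination_by hi - lo
decreasing_by all_goals omega

def split_count_alt (left : List Int) (right : List Int) : Int :=
  let sr := PySem.List.sorted right (fun y => y) false
  left.foldl (fun total x => total + (blLoop sr x 0 sr.length : Int)) 0

-- ===== PRECONDITION & SPEC =====
def Spec_split_count (left : List Int) (right : List Int) (out : Int) : Prop := out = split_count_alt left right
instance (left : List Int) (right : List Int) (out : Int) : Decidable (Spec_split_count left right out) := by unfold Spec_split_count; infer_instance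

-- ===== CLAIM (what is proved, stated in full; the proofs are below) =====
def Claim_equal_split_count : Prop := ∀ (left : List Int) (right : List Int), Dom_split_count left right → Spec_split_count left right (split_count left right)

-- ===== LEMMAS AND PROOFS =====

-- number of elements of r strictly below x
def cntLt (r : List Int) (x : Int) : Nat := (r.filter (fun y => decide (y < x))).length

-- Σ over left of cntLt right
def crossSum (left right : List Int) : Int :=
  (left.map (fun x => (cntLt right x : Int))).sum

-- remaining count seen from loop state (i, j)
def restCount (left right : List Int) (i j : Nat) : Int :=
  (cntLt (right.drop j) (left[i]!) : Int) + crossSum (left.drop (i + 1)) right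

theorem splitLoop_eq (left right : List Int) (value : Int) (i j : Nat) :
    i < left.length → j < right.length →
    splitLoop left right value i j = value + restCount left right i j := by
  induction value, i, j using splitLoop.induct left right with
  | case1 value i j h v j2 hbr ih =>
    intro hi hj
    have hbr' : j + 1 = right.length ∧ i < left.length - 1 := hbr
    have hL : i + 1 < left.length := by omega
    rw [splitLoop]
    simp only [dif_pos h, if_pos hbr']
    show splitLoop left right v (i + 1) 0 = value + restCount left right i j
    rw [ih hL (by omega)]
    have hdrop : right.drop j = right[j]! :: right.drop (j + 1) := by
      rw [getElem!_pos right j hj]; exact List.drop_eq_getElem_cons hj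
    have hdropend : right.drop (j + 1) = ([] : List Int) := by
      apply List.drop_eq_nil_of_le; omega
    have hldrop : left.drop (i + 1) = left[i+1]! :: left.drop (i + 2) := by
      rw [getElem!_pos left (i+1) hL]; exact List.drop_eq_getElem_cons hL
    have hrest0 : restCount left right (i + 1) 0 = crossSum (left.drop (i + 1)) right := by
      rw [restCount, hldrop]
      simp [crossSum]
    have hc : (cntLt (right.drop j) (left[i]!) : Int) = if left[i]! ≤ right[j]! then 0 else 1 := by
      rw [hdrop, hdropend, cntLt, List.filter_cons, List.filter_nil]
      by_cases hlt : right[j]! < left[i]!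
      · rw [if_pos (by simpa using hlt), if_neg (not_le_of_gt hlt)]; simp
      · rw [if_neg (by simpa using hlt), if_pos (not_lt.mp hlt)]; simp
    rw [hrest0, restCount, hc]
    show v + _ = _
    simp only [v]
    split_ifs <;> ring
  | case2 value i j h j2 hbr1 hbr2 =>
    intro hi hj
    have hb1 : ¬ (j + 1 = right.length ∧ i < left.length - 1) := hbr1
    have hb2 : j + 1 = right.length ∧ i = left.length - 1 := hbr2
    rw [splitLoop]
    simp only [dif_pos h, if_neg hb1, if_pos hb2]
    have hdrop : right.drop j = right[j]! :: right.drop (j + 1) := by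
      rw [getElem!_pos right j hj]; exact List.drop_eq_getElem_cons hj
    have hdropend : right.drop (j + 1) = ([] : List Int) := by
      apply List.drop_eq_nil_of_le; omega
    have hldrop : left.drop (i + 1) = ([] : List Int) := by
      apply List.drop_eq_nil_of_le; omega
    rw [restCount, hldrop, hdrop, hdropend]
    rw [getElem!_pos left i hi, getElem!_pos right j hj]
    simp only [crossSum, List.map_nil, List.sum_nil, cntLt, List.filter_cons, List.filter_nil]
    by_cases hlt : right[j] < left[i]
    · rw [if_neg (not_le_of_gt hlt), if_pos (by simpa using hlt)]; simp
    · rw [if_pos (not_lt.mp hlt), if_neg (by simpa using hlt)]; simp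
  | case3 value i j h v j2 hbr1 hbr2 ih =>
    intro hi hj
    have hb1 : ¬ (j + 1 = right.length ∧ i < left.length - 1) := hbr1
    have hb2 : ¬ (j + 1 = right.length ∧ i = left.length - 1) := hbr2
    have hjm : j + 1 ≠ right.length := by
      by_contra hc
      rcases Nat.lt_or_ge i (left.length - 1) with hlt | hge
      · exact hb1 ⟨hc, hlt⟩
      · exact hb2 ⟨hc, by omega⟩
    rw [splitLoop]
    simp only [dif_pos h, if_neg hb1, if_neg hb2]
    show splitLoop left right v i j2 = value + restCount left right i j
    have hj2 : j2 = j + 1 := rfl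
    rw [ih hi (by omega), hj2]
    have hdrop : right.drop j = right[j]! :: right.drop (j + 1) := by
      rw [getElem!_pos right j hj]; exact List.drop_eq_getElem_cons hj
    rw [restCount, restCount, hdrop]
    show v + _ = _
    have hv : v = if left[i]! ≤ right[j]! then value else value + 1 := rfl
    rw [hv, getElem!_pos left i hi, getElem!_pos right j hj]
    simp only [cntLt, List.filter_cons]
    by_cases hlt : right[j] < left[i]
    · rw [if_neg (not_le_of_gt hlt), if_pos (by simpa using hlt)]
      simp only [List.length_cons]
      push_cast
      ring
    · rw [if_pos (not_lt.mp hlt), if_neg (by simpa using hlt)]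
  | case4 value i j h =>
    intro hi hj; exact absurd ⟨hi, hj⟩ h

theorem split_count_eq_crossSum (left right : List Int) :
    split_count left right = crossSum left right := by
  rw [split_count]
  match hl : left, hr : right with
  | [], _ => rw [splitLoop]; simp [crossSum]
  | x :: l, [] => rw [splitLoop]; simp [crossSum, cntLt]
  | x :: l, y :: r =>
    rw [splitLoop_eq _ _ 0 0 0 (by simp) (by simp)]
    simp only [restCount, List.drop_zero, crossSum]
    simp [cntLt]

-- binary search characterisation: with the sortedness invariant, blLoop lo hi = cntLt sr x
theorem blLoop_eq (sr : List Int) (x : Int) (lo hi : Nat)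
    (hpw : sr.Pairwise (fun a b => a ≤ b)) :
    hi ≤ sr.length → lo ≤ hi →
    (∀ k (_ : k < sr.length), k < lo → sr[k] < x) →
    (∀ k (_ : k < sr.length), hi ≤ k → ¬ sr[k] < x) →
    blLoop sr x lo hi = cntLt sr x := by
  induction lo, hi using blLoop.induct sr x with
  | case1 lo hi h mid hm ih =>
    intro hhi hlohi hlow hhigh
    have hmlt : (lo + hi) / 2 < sr.length := by omega
    have hm' : sr[(lo + hi) / 2]! < x := hm
    rw [getElem!_pos sr _ hmlt] at hm'
    rw [blLoop]
    simp only [if_pos h]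
    rw [if_pos (by rwa [getElem!_pos sr _ hmlt])]
    apply ih hhi (by omega)
    · intro k hk hklt
      rcases Nat.lt_or_ge k lo with h1 | h1
      · exact hlow k hk h1
      · have hkm : k ≤ (lo + hi) / 2 := by omega
        rcases Nat.lt_or_eq_of_le hkm with h2 | h2
        · have hle : sr[k] ≤ sr[(lo + hi) / 2] :=
            List.pairwise_iff_getElem.mp hpw k _ hk hmlt h2
          omega
        · subst h2; exact hm'
    · exact hhigh
  | case2 lo hi h mid hm ih =>
    intro hhi hlohi hlow hhigh
    have hmlt : (lo + hi) / 2 < sr.length := by omega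
    have hm' : ¬ sr[(lo + hi) / 2]! < x := hm
    rw [getElem!_pos sr _ hmlt] at hm'
    rw [blLoop]
    simp only [if_pos h]
    rw [if_neg (by rwa [getElem!_pos sr _ hmlt])]
    apply ih (by omega) (by omega) hlow
    intro k hk hmk
    have hle : sr[(lo + hi) / 2] ≤ sr[k] := by
      rcases Nat.lt_or_eq_of_le hmk with h2 | h2
      · exact List.pairwise_iff_getElem.mp hpw _ k hmlt hk h2
      · subst h2; exact le_refl _
    omega
  | case3 lo hi h =>
    intro hhi hlohi hlow hhigh
    have hlo : lo = hi := by omega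
    subst hlo
    rw [blLoop, if_neg h]
    have hsplit : sr = sr.take lo ++ sr.drop lo := (List.take_append_drop lo sr).symm
    rw [cntLt]
    conv_rhs => rw [hsplit]
    rw [List.filter_append, List.length_append]
    have h1 : (sr.take lo).filter (fun y => decide (y < x)) = sr.take lo := by
      apply List.filter_eq_self.mpr
      intro a ha
      rcases List.mem_iff_getElem.mp ha with ⟨k, hk, hak⟩
      have hkl : k < lo := by
        rw [List.length_take] at hk; omega
      have hks : k < sr.length := by
        rw [List.length_take] at hk; omega
      have hx : sr[k] < x := hlow k hks hkl
      rw [List.getElem_take] at hak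
      simp [← hak, hx]
    have h2 : (sr.drop lo).filter (fun y => decide (y < x)) = [] := by
      apply List.filter_eq_nil_iff.mpr
      intro a ha
      rcases List.mem_iff_getElem.mp ha with ⟨k, hk, hak⟩
      have hks : lo + k < sr.length := by
        rw [List.length_drop] at hk; omega
      have hx : ¬ sr[lo + k] < x := hhigh (lo + k) hks (by omega)
      rw [List.getElem_drop] at hak
      simp [← hak]
      omega
    rw [h1, h2]
    rw [List.length_take]
    simp
    omega

theorem blLoop_full (sr : List Int) (x : Int)
    (hpw : sr.Pairwise (fun a b => a ≤ b)) :
    blLoop sr x 0 sr.length = cntLt sr x := by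
  apply blLoop_eq sr x 0 sr.length hpw (le_refl _) (Nat.zero_le _)
  · intro k _ hklt; omega
  · intro k hk _; omega

theorem foldl_bl (sr : List Int) (left : List Int) (acc : Int) :
    left.foldl (fun total x => total + (blLoop sr x 0 sr.length : Int)) acc
      = acc + (left.map (fun x => (blLoop sr x 0 sr.length : Int))).sum := by
  induction left generalizing acc with
  | nil => simp
  | cons y l ih => simp [List.foldl_cons, ih]; ring

theorem split_count_alt_eq_crossSum (left right : List Int) :
    split_count_alt left right = crossSum left right := by
  rw [split_count_alt]
  have hpw : (PySem.List.sorted right (fun y => y) false).Pairwise (fun a b => a ≤ b) := by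
    have := PySem.List.sorted_pairwise (xs := right) (key := fun y => y)
    simpa using this
  have hperm : (PySem.List.sorted right (fun y => y) false).Perm right :=
    PySem.List.sorted_perm right (fun y => y) false
  rw [foldl_bl]
  simp only [zero_add, crossSum]
  congr 1
  apply List.map_congr_left
  intro x _
  rw [blLoop_full _ x hpw]
  simp only [cntLt]
  congr 1
  rw [List.countP_eq_length_filter.symm, List.countP_eq_length_filter.symm]
  exact hperm.countP_eq _

-- ===== VERDICT (by name: the statement is the Claim_ definition above) =====
theorem split_count_spec : Claim_equal_split_count := by
  intro left right _
  unfold Spec_split_count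
  rw [split_count_eq_crossSum, split_count_alt_eq_crossSum]
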